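-- pv_equiv track=rewrite | github.com/sodalone/paper-reading-skill | scripts/extract_images.py | strip_tex_comments
-- ===== SOURCE A (Python) =====
-- def strip_tex_comments(text: str) -> str:
--     stripped = []
--     for line in text.splitlines():
--         out = []
--         i = 0
--         while i < len(line):
--             ch = line[i]
--             if ch == "%" and (i == 0 or line[i - 1] != "\\"):
--                 break
--             out.append(ch)
--             i += 1
--         stripped.append("".join(out))
--     return "\n".join(stripped)
-- ===== SOURCE B (Python) =====
-- def strip_tex_comments(text: str) -> str:
--     kept = []
--     for line in text.splitlines():
--         start = 0
--         while True:
--             pos = line.find("%", start)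
--             if pos == -1:
--                 break
--             if pos == 0 or line[pos - 1] != "\\":
--                 line = line[:pos]
--                 break
--             start = pos + 1
--         kept.append(line)
--     return "\n".join(kept)
-- ===== Notes on version B (the rewrite author's own statement) =====
-- stated objective: faster
-- what changed: Per line, B jumps between percent-sign occurrences with repeated str.find and cuts by slicing, instead of A's char-by-char index loop that appends kept characters one at a time.
import Mathlib
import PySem

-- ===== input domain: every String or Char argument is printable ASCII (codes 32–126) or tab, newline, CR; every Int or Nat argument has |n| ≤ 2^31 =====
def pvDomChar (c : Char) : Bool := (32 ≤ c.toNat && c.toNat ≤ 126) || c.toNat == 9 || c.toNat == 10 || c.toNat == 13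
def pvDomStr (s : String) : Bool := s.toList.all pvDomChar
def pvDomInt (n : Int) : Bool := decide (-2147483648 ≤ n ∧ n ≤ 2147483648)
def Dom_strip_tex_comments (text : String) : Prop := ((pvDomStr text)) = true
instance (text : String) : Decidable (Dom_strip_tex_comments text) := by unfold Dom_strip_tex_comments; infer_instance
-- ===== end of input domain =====

-- B replaces A's char-by-char index loop with repeated str.find hops between '%' occurrences and a slice cut (alternative decomposition, same behaviour).

-- ===== PORT A =====
-- A's inner while loop: state (out, i), break on unescaped '%'.
def pvALine (cs : List Char) (out : List Char) (i : Nat) : List Char :=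
  if i < cs.length then
    let ch := cs.getD i ' '
    if ch = '%' ∧ (i = 0 ∨ cs.getD (i - 1) ' ' ≠ '\\') then out
    else pvALine cs (out ++ [ch]) (i + 1)
  else out
termination_by cs.length - i

def strip_tex_comments (text : String) : String :=
  String.ofList (PySem.Chars.join ['\n']
    ((PySem.Chars.splitlines text.toList).map (fun cs => pvALine cs [] 0)))

-- ===== PORT B =====
-- two facts about str.find cited by pvBLine's termination proof:
theorem pvFindFrom_neg_of_gt (cs sub : List Char) (start : Nat)
    (h : cs.length < start) : PySem.Chars.findFrom cs sub (start : Int) none = -1 := by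
  simp only [PySem.Chars.findFrom]
  have h0 : ¬ ((start : Int) < 0) := by exact_mod_cast Nat.not_lt.mpr (Nat.zero_le start)
  rw [if_neg h0, if_pos (by exact_mod_cast h)]

theorem pvFindFrom_bounds (cs : List Char) (start : Nat)
    (hle : start ≤ cs.length)
    (h : PySem.Chars.findFrom cs ['%'] (start : Int) none ≠ -1) :
    start ≤ (PySem.Chars.findFrom cs ['%'] (start : Int) none).toNat ∧
    (PySem.Chars.findFrom cs ['%'] (start : Int) none).toNat < cs.length := by
  obtain ⟨h1, h2, -⟩ := PySem.Chars.findFrom_natCast_spec cs ['%'] start hle h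
  constructor
  · simpa using Int.toNat_le_toNat h1
  · rcases h2 with ⟨t, ht⟩
    have := congrArg List.length ht
    simp [List.length_drop] at this
    omega

-- B's per-cs while loop: hop to the next '%' with find, cut by slicing.
def pvBLine (cs : List Char) (start : Nat) : List Char :=
  let pos := PySem.Chars.findFrom cs ['%'] (start : Int) none
  if hpos : pos = -1 then cs
  else if pos = 0 ∨ cs.getD (pos.toNat - 1) ' ' ≠ '\\' then cs.take pos.toNat
  else pvBLine cs (pos.toNat + 1)
termination_by cs.length - start
decreasing_by
  by_cases hle : start ≤ cs.length
  · have := pvFindFrom_bounds cs start hle hpos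
    omega
  · exact absurd (pvFindFrom_neg_of_gt cs ['%'] start (by omega)) hpos

def strip_tex_comments_alt (text : String) : String :=
  String.ofList (PySem.Chars.join ['\n']
    ((PySem.Chars.splitlines text.toList).map (fun cs => pvBLine cs 0)))

-- ===== PRECONDITION & SPEC =====
def Spec_strip_tex_comments (text : String) (out : String) : Prop := out = strip_tex_comments_alt text
instance (text : String) (out : String) : Decidable (Spec_strip_tex_comments text out) := by unfold Spec_strip_tex_comments; infer_instance

-- ===== CLAIM (what is proved, stated in full; the proofs are below) =====
def Claim_equal_strip_tex_comments : Prop := ∀ (text : String), Dom_strip_tex_comments text → Spec_strip_tex_comments text (strip_tex_comments text)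

-- ===== LEMMAS AND PROOFS =====

-- 'pvStop cs j' = A's break condition: an unescaped '%' at index j.
def pvStop (cs : List Char) (j : Nat) : Prop :=
  cs.getD j ' ' = '%' ∧ (j = 0 ∨ cs.getD (j - 1) ' ' ≠ '\\')

-- first stop index ≥ i (or cs.length); condition written literally as in pvALine so `if_pos/if_neg` with pvStop apply to both
def pvCut (cs : List Char) (i : Nat) : Nat :=
  if i < cs.length then
    (if cs.getD i ' ' = '%' ∧ (i = 0 ∨ cs.getD (i - 1) ' ' ≠ '\\') then i else pvCut cs (i + 1))
  else cs.length
termination_by cs.length - i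

theorem pvGetD (cs : List Char) (j : Nat) (hj : j < cs.length) :
    cs.getD j ' ' = cs[j] := by
  simp [hj]

theorem pvCut_ge (cs : List Char) (i : Nat) (h : i ≤ cs.length) : i ≤ pvCut cs i := by
  rw [pvCut]
  split_ifs with h1 h2
  · exact le_rfl
  · have := pvCut_ge cs (i + 1) (by omega); omega
  · omega
termination_by cs.length - i

theorem pvCut_skip (cs : List Char) (start k : Nat) (h1 : start ≤ k) (hk : k ≤ cs.length)
    (hns : ∀ j, start ≤ j → j < k → ¬ pvStop cs j) :
    pvCut cs start = pvCut cs k := by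
  rcases Nat.eq_or_lt_of_le h1 with rfl | hlt
  · rfl
  · have hs := hns start le_rfl hlt
    simp only [pvStop] at hs
    rw [pvCut, if_pos (show start < cs.length by omega), if_neg hs]
    exact pvCut_skip cs (start + 1) k hlt hk (fun j hj hjk => hns j (by omega) hjk)
termination_by k - start

theorem pvCut_stop (cs : List Char) (i k : Nat) (hik : i ≤ k) (hk : k < cs.length)
    (hstop : pvStop cs k) (hns : ∀ j, i ≤ j → j < k → ¬ pvStop cs j) :
    pvCut cs i = k := by
  have hs := hstop
  simp only [pvStop] at hs
  rw [pvCut_skip cs i k hik (by omega) hns, pvCut, if_pos hk, if_pos hs]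

theorem pvCut_none (cs : List Char) (i : Nat) (h : i ≤ cs.length)
    (hns : ∀ j, i ≤ j → j < cs.length → ¬ pvStop cs j) :
    pvCut cs i = cs.length := by
  rw [pvCut_skip cs i cs.length h le_rfl hns, pvCut, if_neg (by omega)]

-- A's loop computes out ++ the kept segment
theorem pvALine_eq (cs : List Char) (out : List Char) (i : Nat) :
    pvALine cs out i = out ++ (List.drop i cs).take (pvCut cs i - i) := by
  rw [pvALine, pvCut]
  dsimp only
  by_cases h1 : i < cs.length
  · rw [if_pos h1, if_pos h1]
    by_cases h2 : pvStop cs i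
    · simp only [pvStop] at h2
      rw [if_pos h2, if_pos h2]
      simp
    · simp only [pvStop] at h2
      rw [if_neg h2, if_neg h2]
      rw [pvALine_eq cs (out ++ [cs.getD i ' ']) (i + 1)]
      have hdrop : List.drop i cs = cs.getD i ' ' :: List.drop (i + 1) cs := by
        rw [pvGetD cs i h1]; exact List.drop_eq_getElem_cons h1
      have hsucc : pvCut cs (i + 1) - i = (pvCut cs (i + 1) - (i + 1)) + 1 := by
        have := pvCut_ge cs (i + 1) (by omega); omega
      rw [hdrop, hsucc, List.take_succ_cons, List.append_assoc]
      rfl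
  · rw [if_neg h1, if_neg h1]
    rw [List.drop_eq_nil_of_le (by omega), List.take_nil, List.append_nil]
termination_by cs.length - i

-- bridge: ['%'] is a prefix of drop j cs ↔ '%' sits at index j
theorem pvPrefix_iff (cs : List Char) (j : Nat) :
    ['%'] <+: List.drop j cs ↔ (j < cs.length ∧ cs.getD j ' ' = '%') := by
  constructor
  · rintro ⟨t, ht⟩
    have hj : j < cs.length := by
      by_contra h
      rw [List.drop_eq_nil_of_le (by omega)] at ht
      simp at ht
    refine ⟨hj, ?_⟩
    rw [List.drop_eq_getElem_cons hj] at ht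
    simp only [List.cons_append, List.nil_append, List.cons.injEq] at ht
    rw [pvGetD cs j hj]
    exact ht.1.symm
  · rintro ⟨hj, hc⟩
    refine ⟨List.drop (j + 1) cs, ?_⟩
    rw [List.drop_eq_getElem_cons hj, ← pvGetD cs j hj, hc]
    rfl

-- B's loop computes the kept segment
theorem pvBLine_eq (cs : List Char) (start : Nat) (hle : start ≤ cs.length)
    (hns : ∀ j, j < start → ¬ pvStop cs j) :
    pvBLine cs start = cs.take (pvCut cs 0) := by
  rw [pvBLine]
  by_cases hpos : PySem.Chars.findFrom cs ['%'] (start : Int) none = -1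
  · rw [dif_pos hpos]
    have hno : ¬ (['%'] <:+: List.drop start cs) := by
      rw [← PySem.Chars.findFrom_natCast_eq_neg_one_iff cs ['%'] start hle]; exact hpos
    have hcut : pvCut cs 0 = cs.length := by
      apply pvCut_none cs 0 (by omega)
      intro j _ hj hstop
      by_cases hjs : j < start
      · exact hns j hjs hstop
      · apply hno
        have hpre : ['%'] <+: List.drop (j - start) (List.drop start cs) := by
          rw [List.drop_drop]
          have hadd : start + (j - start) = j := by omega
          rw [hadd]
          exact (pvPrefix_iff cs j).mpr ⟨hj, hstop.1⟩
        exact hpre.isInfix.trans (List.drop_suffix _ _).isInfix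
    rw [hcut, List.take_length]
  · obtain ⟨h1, h2, h3⟩ := PySem.Chars.findFrom_natCast_spec cs ['%'] start hle hpos
    have hb := pvFindFrom_bounds cs start hle hpos
    have hat : cs.getD (PySem.Chars.findFrom cs ['%'] (start : Int) none).toNat ' ' = '%' :=
      ((pvPrefix_iff cs _).mp h2).2
    have hfirst : ∀ j, start ≤ j → j < (PySem.Chars.findFrom cs ['%'] (start : Int) none).toNat →
        cs.getD j ' ' ≠ '%' := by
      intro j hsj hjp hc
      exact h3 j hsj hjp ((pvPrefix_iff cs j).mpr ⟨by omega, hc⟩)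
    rw [dif_neg hpos]
    by_cases hcond : PySem.Chars.findFrom cs ['%'] (start : Int) none = 0 ∨
        cs.getD ((PySem.Chars.findFrom cs ['%'] (start : Int) none).toNat - 1) ' ' ≠ '\\'
    · rw [if_pos hcond]
      have hstop : pvStop cs (PySem.Chars.findFrom cs ['%'] (start : Int) none).toNat := by
        refine ⟨hat, ?_⟩
        rcases hcond with h | h
        · left; omega
        · right; exact h
      have hcut : pvCut cs 0 = (PySem.Chars.findFrom cs ['%'] (start : Int) none).toNat := by
        apply pvCut_stop cs 0 _ (by omega) hb.2 hstop
        intro j _ hj hs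
        by_cases hjs : j < start
        · exact hns j hjs hs
        · exact hfirst j (by omega) hj hs.1
      rw [hcut]
    · rw [if_neg hcond]
      push Not at hcond
      apply pvBLine_eq cs ((PySem.Chars.findFrom cs ['%'] (start : Int) none).toNat + 1) (by omega)
      intro j hj
      by_cases hjs : j < start
      · exact hns j hjs
      · by_cases hjp : j < (PySem.Chars.findFrom cs ['%'] (start : Int) none).toNat
        · intro hs; exact hfirst j (by omega) hjp hs.1
        · have hj' : j = (PySem.Chars.findFrom cs ['%'] (start : Int) none).toNat := by omega
          subst hj'
          rintro ⟨-, h | h⟩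
          · have := hcond.1; omega
          · exact h hcond.2
termination_by cs.length - start
decreasing_by
  have := pvFindFrom_bounds cs start hle hpos
  omega

theorem pvLine_eq (cs : List Char) : pvALine cs [] 0 = pvBLine cs 0 := by
  rw [pvALine_eq, pvBLine_eq cs 0 (by omega) (by omega)]
  simp only [List.nil_append, List.drop_zero, Nat.sub_zero]

-- ===== VERDICT (by name: the statement is the Claim_ definition above) =====
theorem strip_tex_comments_spec : Claim_equal_strip_tex_comments := by
  intro text _
  unfold Spec_strip_tex_comments strip_tex_comments strip_tex_comments_alt
  congr 2
  exact List.map_congr_left (fun cs _ => pvLine_eq cs)
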